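-- pv_equiv track=rewrite | github.com/pietrondo/tutor-ai | backend/book_specific_concept_generator.py | identify_book_type
-- ===== SOURCE A (Python) =====
-- def identify_book_type(book_title: str) -> str:
--     """Identifica il tipo di libro dal titolo."""
--     title_lower = book_title.lower()
--
--     if any(keyword in title_lower for keyword in ['geografia', 'geographic']):
--         return "geography"
--     elif any(keyword in title_lower for keyword in ['storia', 'history']):
--         return "history"
--     elif any(keyword in title_lower for keyword in ['matematica', 'mathematics', 'algebra', 'calcolo']):
--         return "mathematics"
--     elif any(keyword in title_lower for keyword in ['chimica', 'chemistry']):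
--         return "chemistry"
--     elif any(keyword in title_lower for keyword in ['fisica', 'physics']):
--         return "physics"
--     elif any(keyword in title_lower for keyword in ['biologia', 'biology']):
--         return "biology"
--     elif any(keyword in title_lower for keyword in ['economia', 'economics', 'business']):
--         return "economics"
--     elif any(keyword in title_lower for keyword in ['letteratura', 'literature', 'poesia', 'poetry']):
--         return "literature"
--     elif any(keyword in title_lower for keyword in ['filosofia', 'philosophy']):
--         return "philosophy"
--     elif any(keyword in title_lower for keyword in ['psicologia', 'psychology']):
--         return "psychology"
--     else:
--         return "general"
-- ===== SOURCE B (Python) =====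
-- # Different algorithm: instead of checking each keyword group with a substring
-- # search, scan the lowercased title once position by position; at every position
-- # check which keywords start there and keep the best (lowest) priority seen.
-- _KEYWORD_PRIORITY = {
--     'geografia': 0, 'geographic': 0,
--     'storia': 1, 'history': 1,
--     'matematica': 2, 'mathematics': 2, 'algebra': 2, 'calcolo': 2,
--     'chimica': 3, 'chemistry': 3,
--     'fisica': 4, 'physics': 4,
--     'biologia': 5, 'biology': 5,
--     'economia': 6, 'economics': 6, 'business': 6,
--     'letteratura': 7, 'literature': 7, 'poesia': 7, 'poetry': 7,
--     'filosofia': 8, 'philosophy': 8,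
--     'psicologia': 9, 'psychology': 9,
-- }
-- _TYPES = ["geography", "history", "mathematics", "chemistry", "physics",
--           "biology", "economics", "literature", "philosophy", "psychology",
--           "general"]
--
-- def identify_book_type(book_title: str) -> str:
--     """Identifica il tipo di libro dal titolo."""
--     t = book_title.lower()
--     best = 10
--     for i in range(len(t)):
--         for kw, pr in _KEYWORD_PRIORITY.items():
--             if pr < best and t.startswith(kw, i):
--                 best = pr
--     return _TYPES[best]
-- ===== Notes on version B (the rewrite author's own statement) =====
-- stated objective: alternative
-- what changed: Instead of running one substring search per keyword through an elif chain, B scans the lowercased title once position by position, checks which keywords start at each position against a keyword->priority map, keeps the minimum priority seen, and indexes a type table with it.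
import Mathlib
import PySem

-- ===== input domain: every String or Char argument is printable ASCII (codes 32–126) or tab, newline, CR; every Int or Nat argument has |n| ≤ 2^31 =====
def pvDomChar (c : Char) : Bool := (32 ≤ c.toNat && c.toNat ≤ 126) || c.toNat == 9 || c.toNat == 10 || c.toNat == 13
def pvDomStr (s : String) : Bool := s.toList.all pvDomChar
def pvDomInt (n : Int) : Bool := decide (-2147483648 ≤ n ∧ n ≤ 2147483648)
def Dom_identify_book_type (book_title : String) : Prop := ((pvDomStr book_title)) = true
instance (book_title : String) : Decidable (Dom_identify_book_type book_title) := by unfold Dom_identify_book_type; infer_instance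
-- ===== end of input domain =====

-- B replaces A's per-keyword substring searches behind an elif chain by a single
-- position-by-position scan of the lowercased title that keeps the minimum priority
-- of any keyword starting at a position (alternative algorithm, same cost).

-- ===== PORT A =====
def identify_book_type (book_title : String) : String :=
  let title_lower := PySem.Str.lower book_title
  if ["geografia", "geographic"].any (fun keyword => PySem.Str.isIn keyword title_lower) then
    "geography"
  else if ["storia", "history"].any (fun keyword => PySem.Str.isIn keyword title_lower) then
    "history"
  else if ["matematica", "mathematics", "algebra", "calcolo"].any (fun keyword => PySem.Str.isIn keyword title_lower) then
    "mathematics"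
  else if ["chimica", "chemistry"].any (fun keyword => PySem.Str.isIn keyword title_lower) then
    "chemistry"
  else if ["fisica", "physics"].any (fun keyword => PySem.Str.isIn keyword title_lower) then
    "physics"
  else if ["biologia", "biology"].any (fun keyword => PySem.Str.isIn keyword title_lower) then
    "biology"
  else if ["economia", "economics", "business"].any (fun keyword => PySem.Str.isIn keyword title_lower) then
    "economics"
  else if ["letteratura", "literature", "poesia", "poetry"].any (fun keyword => PySem.Str.isIn keyword title_lower) then
    "literature"
  else if ["filosofia", "philosophy"].any (fun keyword => PySem.Str.isIn keyword title_lower) then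
    "philosophy"
  else if ["psicologia", "psychology"].any (fun keyword => PySem.Str.isIn keyword title_lower) then
    "psychology"
  else
    "general"

-- ===== PORT B =====
-- the _KEYWORD_PRIORITY dict of Source B (insertion order), as (keyword, priority) pairs
def pvKw : List (List Char × Nat) :=
  [("geografia".toList, 0), ("geographic".toList, 0),
   ("storia".toList, 1), ("history".toList, 1),
   ("matematica".toList, 2), ("mathematics".toList, 2), ("algebra".toList, 2), ("calcolo".toList, 2),
   ("chimica".toList, 3), ("chemistry".toList, 3),
   ("fisica".toList, 4), ("physics".toList, 4),
   ("biologia".toList, 5), ("biology".toList, 5),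
   ("economia".toList, 6), ("economics".toList, 6), ("business".toList, 6),
   ("letteratura".toList, 7), ("literature".toList, 7), ("poesia".toList, 7), ("poetry".toList, 7),
   ("filosofia".toList, 8), ("philosophy".toList, 8),
   ("psicologia".toList, 9), ("psychology".toList, 9)]

-- the _TYPES table of Source B
def pvTypes : List String :=
  ["geography", "history", "mathematics", "chemistry", "physics",
   "biology", "economics", "literature", "philosophy", "psychology", "general"]

-- inner loop of Source B at position i; Python's t.startswith(kw, i) with 0 ≤ i ≤ len(t)
-- is exactly `kw` being a prefix of t[i:], i.e. Chars.startswith on t.drop i (exact there)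
def pvScanKw (t : List Char) (i : Nat) (b : Nat) : Nat :=
  pvKw.foldl (fun b e => if e.2 < b ∧ PySem.Chars.startswith (t.drop i) e.1 = true then e.2 else b) b

-- outer loop of Source B: for i in range(len(t)), starting from best = 10
def pvBest (t : List Char) : Nat :=
  (List.range t.length).foldl (fun b i => pvScanKw t i b) 10

def identify_book_type_alt (book_title : String) : String :=
  let t := PySem.Chars.lower book_title.toList
  pvTypes.getD (pvBest t) "general"

-- ===== PRECONDITION & SPEC =====
def Spec_identify_book_type (book_title : String) (out : String) : Prop := out = identify_book_type_alt book_title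
instance (book_title : String) (out : String) : Decidable (Spec_identify_book_type book_title out) := by unfold Spec_identify_book_type; infer_instance

-- ===== CLAIM (what is proved, stated in full; the proofs are below) =====
def Claim_equal_identify_book_type : Prop := ∀ (book_title : String), Dom_identify_book_type book_title → Spec_identify_book_type book_title (identify_book_type book_title)

-- ===== LEMMAS AND PROOFS =====

-- priorities of the keywords starting at position i of t
def pvHits (t : List Char) (i : Nat) : List Nat :=
  pvKw.filterMap (fun e => if PySem.Chars.startswith (t.drop i) e.1 = true then some e.2 else none)

-- all priorities of keywords occurring anywhere in t
def pvAll (t : List Char) : List Nat :=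
  (List.range t.length).flatMap (pvHits t)

theorem pvFoldlStep_eq (t : List Char) (i : Nat) :
    ∀ (l : List (List Char × Nat)) (b : Nat),
      l.foldl (fun b e => if e.2 < b ∧ PySem.Chars.startswith (t.drop i) e.1 = true then e.2 else b) b
        = (l.filterMap (fun e => if PySem.Chars.startswith (t.drop i) e.1 = true then some e.2 else none)).foldl min b := by
  intro l
  induction l with
  | nil => intro b; rfl
  | cons e l ih =>
    intro b
    by_cases hs : PySem.Chars.startswith (t.drop i) e.1 = true
    · simp only [List.foldl_cons, List.filterMap_cons, hs, and_true, if_true]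
      have h : (if e.2 < b then e.2 else b) = min b e.2 := by
        rw [min_def]; split_ifs <;> omega
      rw [h]; exact ih _
    · simp only [List.foldl_cons, List.filterMap_cons, hs, Bool.false_eq_true, and_false,
        if_false]
      exact ih b

set_option maxHeartbeats 1000000 in
theorem pvScanKw_eq (t : List Char) (i : Nat) (b : Nat) :
    pvScanKw t i b = (pvHits t i).foldl min b := by
  unfold pvScanKw pvHits
  exact pvFoldlStep_eq t i pvKw b

set_option maxHeartbeats 1000000 in
theorem pvBest_eq_aux (t : List Char) :
    ∀ (idxs : List Nat) (b : Nat),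
      idxs.foldl (fun b i => pvScanKw t i b) b = (idxs.flatMap (pvHits t)).foldl min b := by
  intro idxs
  induction idxs with
  | nil => intro b; simp
  | cons i idxs ih =>
    intro b
    simp only [List.foldl_cons, List.flatMap_cons, List.foldl_append]
    rw [pvScanKw_eq]; exact ih _

set_option maxHeartbeats 1000000 in
theorem pvBest_eq (t : List Char) : pvBest t = (pvAll t).foldl min 10 :=
  pvBest_eq_aux t (List.range t.length) 10

theorem pvFoldlMin_le_init : ∀ (l : List Nat) (b : Nat), l.foldl min b ≤ b := by
  intro l
  induction l with
  | nil => intro b; exact le_rfl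
  | cons x l ih => intro b; exact le_trans (ih _) (min_le_left b x)

theorem pvFoldlMin_le_mem : ∀ (l : List Nat) (b x : Nat), x ∈ l → l.foldl min b ≤ x := by
  intro l
  induction l with
  | nil => intro b x h; cases h
  | cons y l ih =>
    intro b x h
    rcases List.mem_cons.mp h with rfl | h
    · exact le_trans (pvFoldlMin_le_init l _) (min_le_right b x)
    · exact ih _ _ h

theorem pvFoldlMin_mem : ∀ (l : List Nat) (b : Nat), l.foldl min b = b ∨ l.foldl min b ∈ l := by
  intro l
  induction l with
  | nil => intro b; left; rfl
  | cons x l ih =>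
    intro b
    rcases ih (min b x) with h | h
    · rcases Nat.le_total b x with hbx | hbx
      · left; simpa [min_eq_left hbx] using h
      · right; simp only [List.foldl_cons] at *; rw [h, min_eq_right hbx]; exact List.mem_cons_self ..
    · right; exact List.mem_cons_of_mem _ h

theorem pvKw_fst_ne_nil : ∀ p ∈ pvKw, p.1 ≠ [] := by decide

theorem mem_pvAll_iff (t : List Char) (j : Nat) :
    j ∈ pvAll t ↔ ∃ kw, (kw, j) ∈ pvKw ∧ kw <:+: t := by
  unfold pvAll pvHits
  simp only [List.mem_flatMap, List.mem_range, List.mem_filterMap]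
  constructor
  · rintro ⟨i, hi, e, he, hsel⟩
    by_cases hs : PySem.Chars.startswith (t.drop i) e.1 = true
    · rw [if_pos hs] at hsel
      have hj : e.2 = j := Option.some.inj hsel
      refine ⟨e.1, ?_, ?_⟩
      · rwa [← hj, Prod.mk.eta]
      · exact ((PySem.Chars.startswith_iff _ _).mp hs).isInfix.trans (List.drop_suffix i t).isInfix
    · rw [if_neg hs] at hsel; cases hsel
  · rintro ⟨kw, hmem, hinf⟩
    have hne : kw ≠ [] := pvKw_fst_ne_nil (kw, j) hmem
    obtain ⟨i, hp⟩ : ∃ i, kw <+: t.drop i :=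
      (PySem.Chars.exists_prefix_drop_iff_isIn kw t).mpr ((PySem.Chars.isIn_iff_infix kw t).mpr hinf)
    have hi : i < t.length := by
      by_contra h
      have hdrop : t.drop i = [] := List.drop_eq_nil_of_le (Nat.le_of_not_lt h)
      rw [hdrop] at hp
      exact hne (List.prefix_nil.mp hp)
    exact ⟨i, hi, (kw, j), hmem, by rw [if_pos ((PySem.Chars.startswith_iff _ _).mpr hp)]⟩

-- a String-level keyword match of rule j puts priority j into pvAll
theorem mem_pvAll_of_isIn (bt : String) (kwS : String) (j : Nat)
    (hmem : (kwS.toList, j) ∈ pvKw)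
    (h : PySem.Str.isIn kwS (PySem.Str.lower bt) = true) :
    j ∈ pvAll (PySem.Chars.lower bt.toList) := by
  rw [mem_pvAll_iff]
  refine ⟨kwS.toList, hmem, ?_⟩
  have := (PySem.Str.isIn_iff_infix kwS (PySem.Str.lower bt)).mp h
  rwa [PySem.Str.toList_lower] at this

-- priority j in pvAll means rule j's String-level condition holds
theorem cond_of_mem_pvAll (bt : String) (j : Nat) (g : List String)
    (hg : ∀ p ∈ pvKw, p.2 = j → ∃ kwS ∈ g, kwS.toList = p.1)
    (h : j ∈ pvAll (PySem.Chars.lower bt.toList)) :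
    g.any (fun kw => PySem.Str.isIn kw (PySem.Str.lower bt)) = true := by
  obtain ⟨kw, hmem, hinf⟩ := (mem_pvAll_iff _ _).mp h
  obtain ⟨kwS, hkS, hEq⟩ := hg (kw, j) hmem rfl
  refine List.any_eq_true.mpr ⟨kwS, hkS, ?_⟩
  rw [PySem.Str.isIn_iff_infix, PySem.Str.toList_lower, hEq]
  exact hinf

-- ===== VERDICT (by name: the statement is the Claim_ definition above) =====
set_option maxHeartbeats 2000000 in
theorem identify_book_type_spec : Claim_equal_identify_book_type := by
  intro bt _
  unfold Spec_identify_book_type identify_book_type identify_book_type_alt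
  dsimp only
  have hle : pvBest (PySem.Chars.lower bt.toList) ≤ 10 := by
    rw [pvBest_eq]; exact pvFoldlMin_le_init _ _
  have hmem : pvBest (PySem.Chars.lower bt.toList) = 10 ∨
      pvBest (PySem.Chars.lower bt.toList) ∈ pvAll (PySem.Chars.lower bt.toList) := by
    rw [pvBest_eq]; exact pvFoldlMin_mem _ _
  have hmin : ∀ x ∈ pvAll (PySem.Chars.lower bt.toList), pvBest (PySem.Chars.lower bt.toList) ≤ x := by
    rw [pvBest_eq]; exact fun x hx => pvFoldlMin_le_mem _ _ _ hx
  have hto : ∀ (j : Nat) (g : List String),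
      (∀ kwS ∈ g, (kwS.toList, j) ∈ pvKw) →
      g.any (fun kw => PySem.Str.isIn kw (PySem.Str.lower bt)) = true →
      j ∈ pvAll (PySem.Chars.lower bt.toList) := by
    intro j g hg h
    obtain ⟨kwS, hkg, hin⟩ := List.any_eq_true.mp h
    exact mem_pvAll_of_isIn bt kwS j (hg kwS hkg) hin
  obtain ⟨Bv, hBv⟩ : ∃ v, pvBest (PySem.Chars.lower bt.toList) = v := ⟨_, rfl⟩
  rw [hBv] at hle hmem hmin ⊢
  split_ifs with h0 h1 h2 h3 h4 h5 h6 h7 h8 h9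
  · -- branch: rule 0 ("geography") fires
    have hk := hto 0 ["geografia", "geographic"] (by decide) h0
    have hub := hmin _ hk
    rcases hmem with hm | hm
    · exact absurd hm (by omega)
    · interval_cases Bv
      · decide
  · -- branch: rule 1 ("history") fires
    have hk := hto 1 ["storia", "history"] (by decide) h1
    have hub := hmin _ hk
    rcases hmem with hm | hm
    · exact absurd hm (by omega)
    · interval_cases Bv
      · exact absurd (cond_of_mem_pvAll bt 0 ["geografia", "geographic"] (by decide) hm) h0
      · decide
  · -- branch: rule 2 ("mathematics") fires
    have hk := hto 2 ["matematica", "mathematics", "algebra", "calcolo"] (by decide) h2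
    have hub := hmin _ hk
    rcases hmem with hm | hm
    · exact absurd hm (by omega)
    · interval_cases Bv
      · exact absurd (cond_of_mem_pvAll bt 0 ["geografia", "geographic"] (by decide) hm) h0
      · exact absurd (cond_of_mem_pvAll bt 1 ["storia", "history"] (by decide) hm) h1
      · decide
  · -- branch: rule 3 ("chemistry") fires
    have hk := hto 3 ["chimica", "chemistry"] (by decide) h3
    have hub := hmin _ hk
    rcases hmem with hm | hm
    · exact absurd hm (by omega)
    · interval_cases Bv
      · exact absurd (cond_of_mem_pvAll bt 0 ["geografia", "geographic"] (by decide) hm) h0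
      · exact absurd (cond_of_mem_pvAll bt 1 ["storia", "history"] (by decide) hm) h1
      · exact absurd (cond_of_mem_pvAll bt 2 ["matematica", "mathematics", "algebra", "calcolo"] (by decide) hm) h2
      · decide
  · -- branch: rule 4 ("physics") fires
    have hk := hto 4 ["fisica", "physics"] (by decide) h4
    have hub := hmin _ hk
    rcases hmem with hm | hm
    · exact absurd hm (by omega)
    · interval_cases Bv
      · exact absurd (cond_of_mem_pvAll bt 0 ["geografia", "geographic"] (by decide) hm) h0
      · exact absurd (cond_of_mem_pvAll bt 1 ["storia", "history"] (by decide) hm) h1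
      · exact absurd (cond_of_mem_pvAll bt 2 ["matematica", "mathematics", "algebra", "calcolo"] (by decide) hm) h2
      · exact absurd (cond_of_mem_pvAll bt 3 ["chimica", "chemistry"] (by decide) hm) h3
      · decide
  · -- branch: rule 5 ("biology") fires
    have hk := hto 5 ["biologia", "biology"] (by decide) h5
    have hub := hmin _ hk
    rcases hmem with hm | hm
    · exact absurd hm (by omega)
    · interval_cases Bv
      · exact absurd (cond_of_mem_pvAll bt 0 ["geografia", "geographic"] (by decide) hm) h0
      · exact absurd (cond_of_mem_pvAll bt 1 ["storia", "history"] (by decide) hm) h1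
      · exact absurd (cond_of_mem_pvAll bt 2 ["matematica", "mathematics", "algebra", "calcolo"] (by decide) hm) h2
      · exact absurd (cond_of_mem_pvAll bt 3 ["chimica", "chemistry"] (by decide) hm) h3
      · exact absurd (cond_of_mem_pvAll bt 4 ["fisica", "physics"] (by decide) hm) h4
      · decide
  · -- branch: rule 6 ("economics") fires
    have hk := hto 6 ["economia", "economics", "business"] (by decide) h6
    have hub := hmin _ hk
    rcases hmem with hm | hm
    · exact absurd hm (by omega)
    · interval_cases Bv
      · exact absurd (cond_of_mem_pvAll bt 0 ["geografia", "geographic"] (by decide) hm) h0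
      · exact absurd (cond_of_mem_pvAll bt 1 ["storia", "history"] (by decide) hm) h1
      · exact absurd (cond_of_mem_pvAll bt 2 ["matematica", "mathematics", "algebra", "calcolo"] (by decide) hm) h2
      · exact absurd (cond_of_mem_pvAll bt 3 ["chimica", "chemistry"] (by decide) hm) h3
      · exact absurd (cond_of_mem_pvAll bt 4 ["fisica", "physics"] (by decide) hm) h4
      · exact absurd (cond_of_mem_pvAll bt 5 ["biologia", "biology"] (by decide) hm) h5
      · decide
  · -- branch: rule 7 ("literature") fires
    have hk := hto 7 ["letteratura", "literature", "poesia", "poetry"] (by decide) h7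
    have hub := hmin _ hk
    rcases hmem with hm | hm
    · exact absurd hm (by omega)
    · interval_cases Bv
      · exact absurd (cond_of_mem_pvAll bt 0 ["geografia", "geographic"] (by decide) hm) h0
      · exact absurd (cond_of_mem_pvAll bt 1 ["storia", "history"] (by decide) hm) h1
      · exact absurd (cond_of_mem_pvAll bt 2 ["matematica", "mathematics", "algebra", "calcolo"] (by decide) hm) h2
      · exact absurd (cond_of_mem_pvAll bt 3 ["chimica", "chemistry"] (by decide) hm) h3
      · exact absurd (cond_of_mem_pvAll bt 4 ["fisica", "physics"] (by decide) hm) h4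
      · exact absurd (cond_of_mem_pvAll bt 5 ["biologia", "biology"] (by decide) hm) h5
      · exact absurd (cond_of_mem_pvAll bt 6 ["economia", "economics", "business"] (by decide) hm) h6
      · decide
  · -- branch: rule 8 ("philosophy") fires
    have hk := hto 8 ["filosofia", "philosophy"] (by decide) h8
    have hub := hmin _ hk
    rcases hmem with hm | hm
    · exact absurd hm (by omega)
    · interval_cases Bv
      · exact absurd (cond_of_mem_pvAll bt 0 ["geografia", "geographic"] (by decide) hm) h0
      · exact absurd (cond_of_mem_pvAll bt 1 ["storia", "history"] (by decide) hm) h1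
      · exact absurd (cond_of_mem_pvAll bt 2 ["matematica", "mathematics", "algebra", "calcolo"] (by decide) hm) h2
      · exact absurd (cond_of_mem_pvAll bt 3 ["chimica", "chemistry"] (by decide) hm) h3
      · exact absurd (cond_of_mem_pvAll bt 4 ["fisica", "physics"] (by decide) hm) h4
      · exact absurd (cond_of_mem_pvAll bt 5 ["biologia", "biology"] (by decide) hm) h5
      · exact absurd (cond_of_mem_pvAll bt 6 ["economia", "economics", "business"] (by decide) hm) h6
      · exact absurd (cond_of_mem_pvAll bt 7 ["letteratura", "literature", "poesia", "poetry"] (by decide) hm) h7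
      · decide
  · -- branch: rule 9 ("psychology") fires
    have hk := hto 9 ["psicologia", "psychology"] (by decide) h9
    have hub := hmin _ hk
    rcases hmem with hm | hm
    · exact absurd hm (by omega)
    · interval_cases Bv
      · exact absurd (cond_of_mem_pvAll bt 0 ["geografia", "geographic"] (by decide) hm) h0
      · exact absurd (cond_of_mem_pvAll bt 1 ["storia", "history"] (by decide) hm) h1
      · exact absurd (cond_of_mem_pvAll bt 2 ["matematica", "mathematics", "algebra", "calcolo"] (by decide) hm) h2
      · exact absurd (cond_of_mem_pvAll bt 3 ["chimica", "chemistry"] (by decide) hm) h3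
      · exact absurd (cond_of_mem_pvAll bt 4 ["fisica", "physics"] (by decide) hm) h4
      · exact absurd (cond_of_mem_pvAll bt 5 ["biologia", "biology"] (by decide) hm) h5
      · exact absurd (cond_of_mem_pvAll bt 6 ["economia", "economics", "business"] (by decide) hm) h6
      · exact absurd (cond_of_mem_pvAll bt 7 ["letteratura", "literature", "poesia", "poetry"] (by decide) hm) h7
      · exact absurd (cond_of_mem_pvAll bt 8 ["filosofia", "philosophy"] (by decide) hm) h8
      · decide
  · -- branch: no rule fires
    rcases hmem with hm | hm
    · rw [hm]; decide
    · exfalso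
      have hub := hle
      interval_cases Bv
      · exact absurd (cond_of_mem_pvAll bt 0 ["geografia", "geographic"] (by decide) hm) h0
      · exact absurd (cond_of_mem_pvAll bt 1 ["storia", "history"] (by decide) hm) h1
      · exact absurd (cond_of_mem_pvAll bt 2 ["matematica", "mathematics", "algebra", "calcolo"] (by decide) hm) h2
      · exact absurd (cond_of_mem_pvAll bt 3 ["chimica", "chemistry"] (by decide) hm) h3
      · exact absurd (cond_of_mem_pvAll bt 4 ["fisica", "physics"] (by decide) hm) h4
      · exact absurd (cond_of_mem_pvAll bt 5 ["biologia", "biology"] (by decide) hm) h5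
      · exact absurd (cond_of_mem_pvAll bt 6 ["economia", "economics", "business"] (by decide) hm) h6
      · exact absurd (cond_of_mem_pvAll bt 7 ["letteratura", "literature", "poesia", "poetry"] (by decide) hm) h7
      · exact absurd (cond_of_mem_pvAll bt 8 ["filosofia", "philosophy"] (by decide) hm) h8
      · exact absurd (cond_of_mem_pvAll bt 9 ["psicologia", "psychology"] (by decide) hm) h9
      · obtain ⟨kw, hmem10, -⟩ := (mem_pvAll_iff _ _).mp hm
        have hlt : ∀ p ∈ pvKw, p.2 ≠ 10 := by decide
        exact hlt _ hmem10 rfl
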